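-- pv_equiv track=rewrite | github.com/Serby1/-Serby1-MiMTMO_labs- | laba_2.py | get_normalizing_constants
-- ===== SOURCE A (Python) =====
-- def get_normalizing_constants(L, Q, x):
--     g = [[0] * L for _ in range((Q + 1))]
--     for i in range(Q + 1):
--         g[i][0] = x[0]**i
--     g[0] = [1] * L
--
--     for i in range(1, Q + 1):
--         for j in range(1, L):
--             g[i][j] = g[i][j-1] + x[j] * g[i-1][j]
--
--     return g
-- ===== SOURCE B (Python) =====
-- def get_normalizing_constants(L, Q, x):
--     # Buzen table by convolution: column j is the truncated product of column j-1
--     # with the geometric series of x[j]: g[i][j] = sum_{k=0..i} x[j]**k * g[i-k][j-1].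
--     cols = [None] * L
--     cols[0] = [x[0] ** i for i in range(Q + 1)]
--     for j in range(1, L):
--         prev = cols[j - 1]
--         cols[j] = [1] + [sum(x[j] ** k * prev[i - k] for k in range(i + 1))
--                          for i in range(1, Q + 1)]
--     return [[c[i] for c in cols] for i in range(Q + 1)]
-- ===== Notes on version B (the rewrite author's own statement) =====
-- stated objective: alternative
-- what changed: B computes each Buzen column as a full convolution of the previous column with the truncated geometric series of x[j] (g[i][j] = sum_{k<=i} x[j]^k * g[i-k][j-1]), so entries of a column never depend on other entries of the same column, instead of A's two-term in-column recurrence g[i][j] = g[i][j-1] + x[j]*g[i-1][j] over a pre-allocated matrix; it trades the O(L*Q) recurrence for an O(L*Q^2) direct formula.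
import Mathlib
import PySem

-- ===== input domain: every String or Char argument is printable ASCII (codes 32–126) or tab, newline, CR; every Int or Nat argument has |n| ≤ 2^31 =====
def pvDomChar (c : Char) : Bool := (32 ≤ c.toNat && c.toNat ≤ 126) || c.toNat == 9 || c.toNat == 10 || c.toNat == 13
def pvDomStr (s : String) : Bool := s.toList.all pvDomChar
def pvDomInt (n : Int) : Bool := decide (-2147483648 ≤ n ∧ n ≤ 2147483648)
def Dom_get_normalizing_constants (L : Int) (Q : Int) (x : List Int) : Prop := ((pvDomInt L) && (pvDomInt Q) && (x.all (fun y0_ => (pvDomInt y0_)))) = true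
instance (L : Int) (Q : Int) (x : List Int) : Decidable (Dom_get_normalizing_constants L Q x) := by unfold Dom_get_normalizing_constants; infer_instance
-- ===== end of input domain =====

-- B builds each Buzen column as a full convolution of the previous column with the truncated
-- geometric series of x[j] (g[i][j] = Σ_{k≤i} x[j]^k·g[i-k][j-1]) instead of A's in-column
-- two-term recurrence over a pre-allocated matrix; objective: alternative (different algorithm).

-- ===== PORT A =====
def get_normalizing_constants (L : Int) (Q : Int) (x : List Int) : List (List Int) :=
  -- g = [[0]*L for _ in range(Q+1)]
  let g0 := (PySem.List.pyRange 0 (Q + 1) 1).map (fun _ => List.replicate L.toNat 0)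
  -- for i in range(Q+1): g[i][0] = x[0]**i
  let g1 := (PySem.List.pyRange 0 (Q + 1) 1).foldl
    (fun g i => g.set i.toNat ((g.getD i.toNat []).set 0 ((x.getD 0 0) ^ i.toNat))) g0
  -- g[0] = [1]*L
  let g2 := g1.set 0 (List.replicate L.toNat 1)
  -- for i in range(1,Q+1): for j in range(1,L): g[i][j] = g[i][j-1] + x[j]*g[i-1][j]
  (PySem.List.pyRange 1 (Q + 1) 1).foldl
    (fun g i =>
      (PySem.List.pyRange 1 L 1).foldl
        (fun g j =>
          g.set i.toNat ((g.getD i.toNat []).set j.toNat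
            ((g.getD i.toNat []).getD (j.toNat - 1) 0 +
              x.getD j.toNat 0 * (g.getD (i.toNat - 1) []).getD j.toNat 0))) g) g2

-- ===== PORT B =====
def get_normalizing_constants_alt (L : Int) (Q : Int) (x : List Int) : List (List Int) :=
  -- cols = [None]*L; cols[0] = [x[0]**i for i in range(Q+1)]   (the never-read None placeholder
  -- is rendered as []; within Pre_ every placeholder is overwritten before it is read)
  let cols0 := (List.replicate L.toNat ([] : List Int)).set 0
    ((PySem.List.pyRange 0 (Q + 1) 1).map (fun i => (x.getD 0 0) ^ i.toNat))
  -- for j in range(1,L): prev = cols[j-1];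
  --   cols[j] = [1] + [sum(x[j]**k * prev[i-k] for k in range(i+1)) for i in range(1,Q+1)]
  let cols := (PySem.List.pyRange 1 L 1).foldl
    (fun cols j =>
      let prev := cols.getD (j.toNat - 1) []
      cols.set j.toNat ([1] ++ (PySem.List.pyRange 1 (Q + 1) 1).map (fun i =>
        (PySem.List.pyRange 0 (i + 1) 1).foldl
          (fun s k => s + x.getD j.toNat 0 ^ k.toNat * prev.getD (i - k).toNat 0) 0)))
    cols0
  -- return [[c[i] for c in cols] for i in range(Q+1)]
  (PySem.List.pyRange 0 (Q + 1) 1).map (fun i => cols.map (fun c => c.getD i.toNat 0))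

-- ===== PRECONDITION & SPEC =====
-- Pre_ excludes exactly the inputs where Python A raises: Q < 0 (g[0] IndexError), L < 1 or
-- x empty (g[i][0] / x[0] IndexError), and Q ≥ 1 with L > len(x) (x[j] IndexError).
def Pre_get_normalizing_constants (L : Int) (Q : Int) (x : List Int) : Prop :=
  0 ≤ Q ∧ 1 ≤ L ∧ 1 ≤ (x.length : Int) ∧ (Q = 0 ∨ L ≤ (x.length : Int))
instance (L : Int) (Q : Int) (x : List Int) : Decidable (Pre_get_normalizing_constants L Q x) := by
  unfold Pre_get_normalizing_constants; infer_instance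

def pvWitness_get_normalizing_constants : Int × Int × List Int := (2, 2, [2, 3])

def Spec_get_normalizing_constants (L : Int) (Q : Int) (x : List Int) (out : List (List Int)) : Prop := out = get_normalizing_constants_alt L Q x
instance (L : Int) (Q : Int) (x : List Int) (out : List (List Int)) : Decidable (Spec_get_normalizing_constants L Q x out) := by unfold Spec_get_normalizing_constants; infer_instance

-- ===== CLAIM (what is proved, stated in full; the proofs are below) =====
def Claim_equal_get_normalizing_constants : Prop := ∀ (L : Int) (Q : Int) (x : List Int), Dom_get_normalizing_constants L Q x → Pre_get_normalizing_constants L Q x → Spec_get_normalizing_constants L Q x (get_normalizing_constants L Q x)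

-- ===== LEMMAS AND PROOFS =====

-- The common mathematical table: G i 0 = x0^i, G 0 j = 1, G i j = G i (j-1) + x_j * G (i-1) j.
def Gm (x : List Int) : Nat → Nat → Int
  | i, 0 => (x.getD 0 0) ^ i
  | 0, _ + 1 => 1
  | i + 1, j + 1 => Gm x (i + 1) j + x.getD (j + 1) 0 * Gm x i (j + 1)

theorem Gm_zero_row (x : List Int) (j : Nat) : Gm x 0 j = 1 := by
  cases j <;> simp [Gm]

-- set on a map-over-range stays a map-over-range
theorem set_map_range {α : Type} (f : Nat → α) (t k : Nat) (v : α) (_hk : k < t) :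
    ((List.range t).map f).set k v = (List.range t).map (fun i => if i = k then v else f i) := by
  apply List.ext_getElem <;> simp
  intro i hi
  rcases eq_or_ne i k with h | h
  · simp [h]
  · simp [h, Ne.symm h]

theorem getD_map_range' {α : Type} [Inhabited α] (f : Nat → α) (t k : Nat) (d : α) (hk : k < t) :
    ((List.range t).map f).getD k d = f k := by
  rw [List.getD_eq_getElem?_getD]
  simp [hk]

-- ---- B side ----

-- convolution identity: Gm i (j+1) is the truncated geometric convolution of column j
theorem Gm_conv (x : List Int) (j : Nat) (i : Nat) :
    ((List.range (i + 1)).map (fun k => x.getD (j + 1) 0 ^ k * Gm x (i - k) j)).sum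
      = Gm x i (j + 1) := by
  induction i with
  | zero => simp [Gm_zero_row]
  | succ i ih =>
    rw [List.range_succ_eq_map, List.map_cons, List.map_map, List.sum_cons]
    have hmap : ((List.range (i + 1)).map
        ((fun k => x.getD (j + 1) 0 ^ k * Gm x (i + 1 - k) j) ∘ Nat.succ))
        = (List.range (i + 1)).map
          (fun k => x.getD (j + 1) 0 * (x.getD (j + 1) 0 ^ k * Gm x (i - k) j)) := by
      apply List.map_congr_left
      intro k _
      simp only [Function.comp]
      have : i + 1 - (k + 1) = i - k := by omega
      rw [this, pow_succ]
      ring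
    rw [hmap, PySem.List.sum_map_const_mul_int, ih]
    simp [Gm]

-- the new column produced by the inner comprehension
theorem b_col (x : List Int) (n : Nat) (t : Nat) :
    ([1] ++ (PySem.List.pyRange 1 ((n : Int) + 1) 1).map (fun i =>
      (PySem.List.pyRange 0 (i + 1) 1).foldl
        (fun s k => s + x.getD (t + 1) 0 ^ k.toNat *
          (((List.range (n + 1)).map (fun i' => Gm x i' t)).getD (i - k).toNat 0)) 0))
    = (List.range (n + 1)).map (fun i => Gm x i (t + 1)) := by
  conv_rhs => rw [List.range_succ_eq_map]
  rw [List.map_cons, List.map_map, Gm_zero_row, List.singleton_append]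
  congr 1
  rw [PySem.List.pyRange_one]
  have : ((n : Int) + 1 - 1).toNat = n := by omega
  rw [this, List.map_map]
  apply List.map_congr_left
  intro m hm
  simp only [List.mem_range] at hm
  simp only [Function.comp]
  have h1 : (1 : Int) + (m : Int) + 1 = ((m + 2 : Nat) : Int) := by push_cast; ring
  rw [h1, PySem.List.pyRange_one]
  have h2 : (((m + 2 : Nat) : Int) - 0).toNat = m + 2 := by omega
  rw [h2]
  rw [List.foldl_map, PySem.List.foldl_add, zero_add]
  have h4 : ((List.range (m + 2)).map (fun (k : Nat) =>
      x.getD (t + 1) 0 ^ ((0 : Int) + (k : Int)).toNat *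
        (((List.range (n + 1)).map (fun i' => Gm x i' t)).getD
          ((1 : Int) + m - ((0 : Int) + (k : Int))).toNat 0)))
      = (List.range (m + 2)).map (fun (k : Nat) =>
        x.getD (t + 1) 0 ^ k * Gm x (m + 1 - k) t) := by
    apply List.map_congr_left
    intro k hk
    simp only [List.mem_range] at hk
    have e1 : ((0 : Int) + (k : Int)).toNat = k := by omega
    have e2 : ((1 : Int) + m - ((0 : Int) + (k : Int))).toNat = m + 1 - k := by omega
    rw [e1, e2, getD_map_range' _ _ _ _ (by omega)]
  rw [h4, Gm_conv x t (m + 1)]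

-- outer loop invariant: after j = 1..t, columns 0..t hold the Buzen values
theorem b_outer (x : List Int) (n m : Nat) (hm : 1 ≤ m) (t : Nat) (ht : t ≤ m - 1) :
    (PySem.List.pyRange 1 (1 + (t : Int)) 1).foldl
      (fun cols j =>
        cols.set j.toNat ([1] ++ (PySem.List.pyRange 1 ((n : Int) + 1) 1).map (fun i =>
          (PySem.List.pyRange 0 (i + 1) 1).foldl
            (fun s k => s + x.getD j.toNat 0 ^ k.toNat *
              (cols.getD (j.toNat - 1) []).getD (i - k).toNat 0) 0)))
      (((List.range m).map (fun _ => ([] : List Int))).set 0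
        ((List.range (n + 1)).map (fun i => Gm x i 0)))
    = (List.range m).map (fun j => if j ≤ t then
        (List.range (n + 1)).map (fun i => Gm x i j) else []) := by
  induction t with
  | zero =>
    rw [PySem.List.pyRange_one_eq_nil (a := 1) (b := 1 + ((0 : Nat) : Int)) (by simp),
      List.foldl_nil, set_map_range _ _ _ _ (by omega)]
    apply List.map_congr_left
    intro j _
    rcases Nat.eq_zero_or_pos j with h | h
    · subst h; simp
    · have h1 : j ≠ 0 := by omega
      have h2 : ¬ j ≤ 0 := by omega
      simp [h1, h2]
  | succ t ih =>
    have h1 : 1 + ((t + 1 : Nat) : Int) = (1 + (t : Int)) + 1 := by push_cast; ring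
    rw [h1, PySem.List.pyRange_one_succ_right (a := 1) (b := 1 + (t : Int)) (by omega),
      List.foldl_append, ih (by omega)]
    simp only [List.foldl_cons, List.foldl_nil]
    have htn : (1 + (t : Int)).toNat = t + 1 := by omega
    rw [htn]
    have e1 : t + 1 - 1 = t := by omega
    rw [e1, getD_map_range' _ _ _ _ (by omega)]
    have e2 : (if t ≤ t then (List.range (n + 1)).map (fun i => Gm x i t) else [])
        = (List.range (n + 1)).map (fun i' => Gm x i' t) := by simp
    rw [e2, b_col x n t, set_map_range _ _ _ _ (by omega)]
    apply List.map_congr_left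
    intro j _
    rcases eq_or_ne j (t + 1) with h | h
    · simp [h]
    · have h2 : j ≤ t + 1 ↔ j ≤ t := by omega
      simp [h, h2]

theorem b_eq (x : List Int) (n m : Nat) (hm : 1 ≤ m) :
    get_normalizing_constants_alt (m : Int) (n : Int) x
    = (List.range (n + 1)).map (fun i => (List.range m).map (fun j => Gm x i j)) := by
  unfold get_normalizing_constants_alt
  dsimp only
  simp only [Int.toNat_natCast]
  have hrepl : (List.replicate m ([] : List Int)) = (List.range m).map (fun _ => []) := by
    simp [List.map_const']
  have hcol : (PySem.List.pyRange 0 ((n : Int) + 1) 1).map (fun i => (x.getD 0 0) ^ i.toNat)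
      = (List.range (n + 1)).map (fun i => Gm x i 0) := by
    rw [PySem.List.pyRange_one]
    have : ((n : Int) + 1 - 0).toNat = n + 1 := by omega
    rw [this, List.map_map]
    apply List.map_congr_left
    intro i _
    simp [Gm]
  rw [hrepl, hcol]
  have hL : ((m : Nat) : Int) = 1 + ((m - 1 : Nat) : Int) := by omega
  rw [hL, b_outer x n m hm (m - 1) (le_refl _)]
  have hcols : ((List.range m).map (fun j => if j ≤ m - 1 then
      (List.range (n + 1)).map (fun i => Gm x i j) else []))
      = (List.range m).map (fun j => (List.range (n + 1)).map (fun i => Gm x i j)) := by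
    apply List.map_congr_left
    intro j hj
    simp only [List.mem_range] at hj
    have : j ≤ m - 1 := by omega
    simp [this]
  rw [hcols, PySem.List.pyRange_one]
  have : ((n : Int) + 1 - 0).toNat = n + 1 := by omega
  rw [this, List.map_map]
  apply List.map_congr_left
  intro i hi
  simp only [List.mem_range] at hi
  simp only [Function.comp]
  rw [List.map_map]
  apply List.map_congr_left
  intro j _
  simp only [Function.comp]
  have : ((0 : Int) + (i : Int)).toNat = i := by omega
  rw [this, getD_map_range' _ _ _ _ hi]

-- ---- A side ----

def rowStart (x : List Int) (m i : Nat) : List Int :=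
  (List.replicate m 0).set 0 ((x.getD 0 0) ^ i)

def rowA (x : List Int) (m : Nat) : Nat → List Int
  | 0 => List.replicate m 1
  | i + 1 => (PySem.List.pyRange 1 (m : Int) 1).foldl
      (fun row jI => row.set jI.toNat (row.getD (jI.toNat - 1) 0 +
        x.getD jI.toNat 0 * (rowA x m i).getD jI.toNat 0)) (rowStart x m (i + 1))

-- the first loop writes x0^i into column 0 of each row, row by row
theorem a_init_aux (x : List Int) (n m : Nat) (k : Nat) (hk : k ≤ n + 1) :
    (PySem.List.pyRange 0 (k : Int) 1).foldl
      (fun g i => g.set i.toNat ((g.getD i.toNat []).set 0 ((x.getD 0 0) ^ i.toNat)))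
      ((List.range (n + 1)).map (fun _ => List.replicate m 0))
    = (List.range (n + 1)).map
        (fun i => if i < k then rowStart x m i else List.replicate m 0) := by
  induction k with
  | zero =>
    rw [PySem.List.pyRange_one_eq_nil (a := 0) (b := ((0 : Nat) : Int)) (by simp), List.foldl_nil]
    simp
  | succ k ih =>
    have h1 : ((k + 1 : Nat) : Int) = (k : Int) + 1 := by push_cast; ring
    rw [h1, PySem.List.pyRange_one_succ_right (a := 0) (b := (k : Int)) (by omega),
      List.foldl_append, ih (by omega)]
    simp only [List.foldl_cons, List.foldl_nil, Int.toNat_natCast]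
    rw [getD_map_range' _ _ _ _ (by omega)]
    have hkk : ¬ k < k := by omega
    rw [if_neg hkk, set_map_range _ _ _ _ (by omega)]
    apply List.map_congr_left
    intro i hi
    simp only [List.mem_range] at hi
    rcases eq_or_ne i k with h | h
    · simp [h, rowStart]
    · have : i < k + 1 ↔ i < k := by omega
      simp [h, this]

-- the inner j-loop touches only row i of the matrix
theorem inner_matrix (x : List Int) (js : List Int) (i : Nat) (hi : 1 ≤ i)
    (g : List (List Int)) (hlen : i < g.length) :
    js.foldl (fun g jI => g.set i ((g.getD i []).set jI.toNat
        ((g.getD i []).getD (jI.toNat - 1) 0 +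
          x.getD jI.toNat 0 * (g.getD (i - 1) []).getD jI.toNat 0))) g
    = g.set i (js.foldl (fun row jI => row.set jI.toNat
        (row.getD (jI.toNat - 1) 0 +
          x.getD jI.toNat 0 * (g.getD (i - 1) []).getD jI.toNat 0)) (g.getD i [])) := by
  induction js generalizing g with
  | nil =>
    simp only [List.foldl_nil]
    apply List.ext_getElem
    · simp
    · intro t ht1 ht2
      rw [List.getElem_set]
      split_ifs with h
      · subst h; rw [List.getD_eq_getElem _ _ (by omega)]
      · rfl
  | cons j js ih =>
    simp only [List.foldl_cons]
    rw [ih _ (by simpa using hlen)]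
    have hget : ((g.set i ((g.getD i []).set j.toNat
        ((g.getD i []).getD (j.toNat - 1) 0 +
          x.getD j.toNat 0 * (g.getD (i - 1) []).getD j.toNat 0))).getD i [])
        = (g.getD i []).set j.toNat
        ((g.getD i []).getD (j.toNat - 1) 0 +
          x.getD j.toNat 0 * (g.getD (i - 1) []).getD j.toNat 0) := by
      rw [List.getD_eq_getElem _ _ (by simpa using hlen), List.getElem_set_self]
    have hgetp : ((g.set i ((g.getD i []).set j.toNat
        ((g.getD i []).getD (j.toNat - 1) 0 +
          x.getD j.toNat 0 * (g.getD (i - 1) []).getD j.toNat 0))).getD (i - 1) [])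
        = g.getD (i - 1) [] := by
      rcases Nat.lt_or_ge (i - 1) g.length with h | h
      · rw [List.getD_eq_getElem _ _ (by simpa using h), List.getElem_set_ne (by omega)]
        exact (List.getD_eq_getElem _ _ h).symm
      · rw [List.getD_eq_default _ _ (by simpa using h), List.getD_eq_default _ _ h]
    rw [hget, hgetp, List.set_set]

-- the outer i-loop finalizes rows 1..t in order
theorem a_rows (x : List Int) (n m : Nat) (t : Nat) (ht : t ≤ n) :
    (PySem.List.pyRange 1 (1 + (t : Int)) 1).foldl
      (fun g iI => (PySem.List.pyRange 1 (m : Int) 1).foldl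
        (fun g jI => g.set iI.toNat ((g.getD iI.toNat []).set jI.toNat
          ((g.getD iI.toNat []).getD (jI.toNat - 1) 0 +
            x.getD jI.toNat 0 * (g.getD (iI.toNat - 1) []).getD jI.toNat 0))) g)
      ((List.range (n + 1)).map
        (fun i => if i ≤ 0 then rowA x m 0 else rowStart x m i))
    = (List.range (n + 1)).map
        (fun i => if i ≤ t then rowA x m i else rowStart x m i) := by
  induction t with
  | zero =>
    rw [PySem.List.pyRange_one_eq_nil (a := 1) (b := 1 + ((0 : Nat) : Int)) (by simp),
      List.foldl_nil]
    apply List.map_congr_left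
    intro i _
    rcases Nat.eq_zero_or_pos i with h | h
    · subst h; simp
    · have : ¬ i ≤ 0 := by omega
      simp [this]
  | succ t ih =>
    have h1 : 1 + ((t + 1 : Nat) : Int) = (1 + (t : Int)) + 1 := by push_cast; ring
    rw [h1, PySem.List.pyRange_one_succ_right (a := 1) (b := 1 + (t : Int)) (by omega),
      List.foldl_append, ih (by omega)]
    simp only [List.foldl_cons, List.foldl_nil]
    have htn : (1 + (t : Int)).toNat = t + 1 := by omega
    rw [htn]
    rw [inner_matrix x _ (t + 1) (by omega) _ (by simp; omega)]
    have hrow : (((List.range (n + 1)).map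
        (fun i => if i ≤ t then rowA x m i else rowStart x m i)).getD (t + 1) [])
        = rowStart x m (t + 1) := by
      rw [getD_map_range' _ _ _ _ (by omega)]
      simp
    have hprev : (((List.range (n + 1)).map
        (fun i => if i ≤ t then rowA x m i else rowStart x m i)).getD (t + 1 - 1) [])
        = rowA x m t := by
      rw [getD_map_range' _ _ _ _ (by omega)]
      simp
    rw [hrow, hprev]
    have hfold : (PySem.List.pyRange 1 (m : Int) 1).foldl
        (fun row jI => row.set jI.toNat (row.getD (jI.toNat - 1) 0 +
          x.getD jI.toNat 0 * (rowA x m t).getD jI.toNat 0)) (rowStart x m (t + 1))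
        = rowA x m (t + 1) := rfl
    rw [hfold, set_map_range _ _ _ _ (by omega)]
    apply List.map_congr_left
    intro i hi
    simp only [List.mem_range] at hi
    rcases eq_or_ne i (t + 1) with h | h
    · simp [h]
    · have h2 : i ≤ t + 1 ↔ i ≤ t := by omega
      simp [h, h2]

-- the j-loop fills row i+1 left to right with the recurrence values
theorem a_inner_row (x : List Int) (m : Nat) (hm : 1 ≤ m) (i k : Nat) (hk : k ≤ m - 1) :
    (PySem.List.pyRange 1 (1 + (k : Int)) 1).foldl
      (fun row jI => row.set jI.toNat (row.getD (jI.toNat - 1) 0 +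
        x.getD jI.toNat 0 * ((List.range m).map (fun j => Gm x i j)).getD jI.toNat 0))
      (rowStart x m (i + 1))
    = (List.range m).map (fun j => if j ≤ k then Gm x (i + 1) j else 0) := by
  induction k with
  | zero =>
    rw [PySem.List.pyRange_one_eq_nil (a := 1) (b := 1 + ((0 : Nat) : Int)) (by simp),
      List.foldl_nil]
    unfold rowStart
    have hrepl : (List.replicate m (0 : Int)) = (List.range m).map (fun _ => 0) := by
      simp [List.map_const']
    rw [hrepl, set_map_range _ _ _ _ (by omega)]
    apply List.map_congr_left
    intro j hj
    simp only [List.mem_range] at hj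
    rcases Nat.eq_zero_or_pos j with h | h
    · subst h; simp [Gm]
    · have h1 : j ≠ 0 := by omega
      have h2 : ¬ j ≤ 0 := by omega
      simp [h1, h2]
  | succ k ih =>
    have h1 : 1 + ((k + 1 : Nat) : Int) = (1 + (k : Int)) + 1 := by push_cast; ring
    rw [h1, PySem.List.pyRange_one_succ_right (a := 1) (b := 1 + (k : Int)) (by omega),
      List.foldl_append, ih (by omega)]
    simp only [List.foldl_cons, List.foldl_nil]
    have htn : (1 + (k : Int)).toNat = k + 1 := by omega
    rw [htn]
    have e1 : k + 1 - 1 = k := by omega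
    rw [e1, getD_map_range' _ _ _ _ (by omega), getD_map_range' _ _ _ _ (by omega)]
    have e2 : (if k ≤ k then Gm x (i + 1) k else 0) = Gm x (i + 1) k := by simp
    rw [e2]
    have e3 : Gm x (i + 1) k + x.getD (k + 1) 0 * Gm x i (k + 1) = Gm x (i + 1) (k + 1) := by
      simp [Gm]
    rw [e3, set_map_range _ _ _ _ (by omega)]
    apply List.map_congr_left
    intro j hj
    simp only [List.mem_range] at hj
    rcases eq_or_ne j (k + 1) with h | h
    · simp [h]
    · have h2 : j ≤ k + 1 ↔ j ≤ k := by omega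
      simp [h, h2]

theorem rowA_eq (x : List Int) (m : Nat) (hm : 1 ≤ m) (i : Nat) :
    rowA x m i = (List.range m).map (fun j => Gm x i j) := by
  induction i with
  | zero =>
    unfold rowA
    apply List.ext_getElem
    · simp
    · intro t ht1 ht2
      simp [Gm_zero_row]
  | succ i ih =>
    unfold rowA
    rw [ih]
    have hL : (m : Int) = 1 + ((m - 1 : Nat) : Int) := by omega
    rw [hL, a_inner_row x m hm i (m - 1) (le_refl _)]
    apply List.map_congr_left
    intro j hj
    simp only [List.mem_range] at hj
    have : j ≤ m - 1 := by omega
    simp [this]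

theorem a_eq (x : List Int) (n m : Nat) (hm : 1 ≤ m) :
    get_normalizing_constants (m : Int) (n : Int) x
    = (List.range (n + 1)).map (fun i => (List.range m).map (fun j => Gm x i j)) := by
  unfold get_normalizing_constants
  dsimp only
  simp only [Int.toNat_natCast]
  have hg0 : (PySem.List.pyRange 0 ((n : Int) + 1) 1).map
      (fun _ => List.replicate m (0 : Int))
      = (List.range (n + 1)).map (fun _ => List.replicate m 0) := by
    rw [PySem.List.pyRange_one]
    have : ((n : Int) + 1 - 0).toNat = n + 1 := by omega
    rw [this, List.map_map]
    simp [Function.comp_def, List.map_const']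
  rw [hg0]
  have hrange : PySem.List.pyRange 0 ((n : Int) + 1) 1
      = PySem.List.pyRange 0 (((n + 1 : Nat) : Int)) 1 := by push_cast; ring_nf
  rw [hrange, a_init_aux x n m (n + 1) (le_refl _)]
  have hg1 : ((List.range (n + 1)).map
      (fun i => if i < n + 1 then rowStart x m i else List.replicate m 0))
      = (List.range (n + 1)).map (fun i => rowStart x m i) := by
    apply List.map_congr_left
    intro i hi
    simp only [List.mem_range] at hi
    simp [hi]
  rw [hg1]
  have hg2 : ((List.range (n + 1)).map (fun i => rowStart x m i)).set 0
      (List.replicate m (1 : Int))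
      = (List.range (n + 1)).map
        (fun i => if i ≤ 0 then rowA x m 0 else rowStart x m i) := by
    rw [set_map_range _ _ _ _ (by omega)]
    apply List.map_congr_left
    intro i hi
    rcases Nat.eq_zero_or_pos i with h | h
    · subst h; simp [rowA]
    · have h1 : i ≠ 0 := by omega
      have h2 : ¬ i ≤ 0 := by omega
      simp [h1, h2]
  rw [hg2]
  have hQ : (n : Int) + 1 = 1 + (n : Int) := by ring
  rw [hQ, a_rows x n m n (le_refl _)]
  apply List.map_congr_left
  intro i hi
  simp only [List.mem_range] at hi
  have : i ≤ n := by omega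
  simp only [if_pos this]
  exact rowA_eq x m hm i

-- ===== VERDICT (by name: the statement is the Claim_ definition above) =====
theorem get_normalizing_constants_spec : Claim_equal_get_normalizing_constants := by
  intro L Q x _ hPre
  obtain ⟨hQ, hL, -, -⟩ := hPre
  unfold Spec_get_normalizing_constants
  have hQn : Q = ((Q.toNat : Nat) : Int) := by omega
  have hLn : L = ((L.toNat : Nat) : Int) := by omega
  have hm : 1 ≤ L.toNat := by omega
  rw [hQn, hLn, a_eq x Q.toNat L.toNat hm, b_eq x Q.toNat L.toNat hm]
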